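-- pv_equiv track=rewrite | github.com/seilk/Algorithm-PS | BAEKJOON/이 얼마나 끔찍하고 무시무시한 수식이니_23629.py | check
-- ===== SOURCE A (Python) =====
-- def check(s: str) -> bool:
--   flg = False  # 연산자가 연속해서 나오는 경우 체크
--   for i in range(len(s)):
--     if s[i] in ["+", "-", "x", "/", "="]:
--       if flg:
--         return False
--       flg = True
--       continue
--     elif not (48 <= ord(s[i]) <= 57):
--       return False
--     flg = False
--   return True
-- ===== SOURCE B (Python) =====
-- OPS = frozenset("+-x/=")
--
-- def check(s: str) -> bool:
--     return (all(c in OPS or '0' <= c <= '9' for c in s)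
--             and all(not (a in OPS and b in OPS) for a, b in zip(s, s[1:])))
-- ===== Notes on version B (the rewrite author's own statement) =====
-- stated objective: idiomatic
-- what changed: Replaces the stateful flag-carrying scan with early returns by two stateless declarative passes: an alphabet check over all characters plus an adjacent-pair check over zip(s, s[1:]).
import Mathlib
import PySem

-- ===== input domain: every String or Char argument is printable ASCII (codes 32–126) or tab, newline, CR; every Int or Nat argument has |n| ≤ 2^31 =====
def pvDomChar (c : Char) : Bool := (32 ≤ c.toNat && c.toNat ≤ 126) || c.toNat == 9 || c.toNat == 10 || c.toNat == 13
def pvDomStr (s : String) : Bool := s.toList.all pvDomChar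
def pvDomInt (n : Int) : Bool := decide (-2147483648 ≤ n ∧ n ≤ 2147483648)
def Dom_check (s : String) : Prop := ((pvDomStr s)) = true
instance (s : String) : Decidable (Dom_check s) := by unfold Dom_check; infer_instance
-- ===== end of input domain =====

-- B replaces A's stateful flag scan by two stateless passes (alphabet check + adjacent-pair check); same behaviour, more idiomatic.

def isOpC (c : Char) : Bool := c = '+' || c = '-' || c = 'x' || c = '/' || c = '='

-- ===== PORT A =====
-- A's loop over indices with the flag `flg` and early returns, as structural recursion over the characters.
def checkAux : List Char → Bool → Bool
  | [], _ => true
  | c :: rest, flg =>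
    if isOpC c then
      if flg then false else checkAux rest true
    else if !(48 ≤ c.toNat && c.toNat ≤ 57) then false
    else checkAux rest false

def check (s : String) : Bool := checkAux s.toList false

-- ===== PORT B =====
-- Source B: all chars are op or digit, and no adjacent pair (from zip(s, s[1:])) is op-op.
def check_alt (s : String) : Bool :=
  (s.toList.all (fun c => isOpC c || ('0' ≤ c && c ≤ '9'))) &&
  ((s.toList.zip s.toList.tail).all (fun p => !(isOpC p.1 && isOpC p.2)))

-- ===== PRECONDITION & SPEC =====
def Spec_check (s : String) (out : Bool) : Prop := out = check_alt s
instance (s : String) (out : Bool) : Decidable (Spec_check s out) := by unfold Spec_check; infer_instance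

-- ===== CLAIM (what is proved, stated in full; the proofs are below) =====
def Claim_equal_check : Prop := ∀ (s : String), Dom_check s → Spec_check s (check s)

-- ===== LEMMAS AND PROOFS =====

def adjOK : List Char → Bool
  | a :: b :: t => !(isOpC a && isOpC b) && adjOK (b :: t)
  | _ => true

def headOp : List Char → Bool
  | [] => false
  | c :: _ => isOpC c

lemma adjOK_eq_zip (l : List Char) :
    ((l.zip l.tail).all (fun p => !(isOpC p.1 && isOpC p.2))) = adjOK l := by
  induction l with
  | nil => rfl
  | cons a t ih =>
    cases t with
    | nil => rfl
    | cons b t' =>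
      simp only [List.tail_cons, List.zip_cons_cons, List.all_cons, adjOK]
      rw [← ih]
      rfl

lemma digit_iff (c : Char) :
    (decide (48 ≤ c.toNat) && decide (c.toNat ≤ 57)) = (decide ('0' ≤ c) && decide (c ≤ '9')) := by
  have h1 : ('0' ≤ c) ↔ (48 ≤ c.toNat) := by
    rw [Char.le_def, UInt32.le_iff_toNat_le]; rfl
  have h2 : (c ≤ '9') ↔ (c.toNat ≤ 57) := by
    rw [Char.le_def, UInt32.le_iff_toNat_le]; rfl
  simp [h1, h2]

lemma checkAux_eq (l : List Char) (flg : Bool) :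
    checkAux l flg =
      ((l.all (fun c => isOpC c || ('0' ≤ c && c ≤ '9'))) && adjOK l && !(flg && headOp l)) := by
  induction l generalizing flg with
  | nil => simp [checkAux, adjOK, headOp]
  | cons c t ih =>
    simp only [checkAux, List.all_cons]
    by_cases hop : isOpC c = true
    · cases flg with
      | true => simp [hop, headOp]
      | false =>
        simp only [if_pos hop, Bool.false_and, Bool.not_false]
        rw [ih]
        cases t with
        | nil => simp [adjOK, headOp, hop]
        | cons b t' =>
          simp only [adjOK, headOp, hop, Bool.true_and, Bool.and_true]
          cases isOpC b <;> cases adjOK (b :: t') <;> simp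
    · rw [if_neg hop]
      by_cases hd : (decide ('0' ≤ c) && decide (c ≤ '9')) = true
      · rw [digit_iff, hd]
        simp only [Bool.not_true, Bool.false_eq_true, if_false]
        rw [ih]
        cases t with
        | nil => simp [adjOK, headOp, hop]
        | cons b t' => simp [adjOK, headOp, hop]
      · have hd' : (decide ('0' ≤ c) && decide (c ≤ '9')) = false := Bool.eq_false_iff.mpr hd
        rw [digit_iff, hd']
        simp [hop]

-- ===== VERDICT (by name: the statement is the Claim_ definition above) =====
theorem check_spec : Claim_equal_check := by
  intro s _
  unfold Spec_check check check_alt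
  rw [checkAux_eq, adjOK_eq_zip]
  simp
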